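-- pv_equiv track=rewrite | github.com/slawa19/DocxAICorrector | document_pipeline_output_validation.py | is_heading_like_alpha_token
-- ===== SOURCE A (Python) =====
-- def is_heading_like_alpha_token(token: str) -> bool:
--     stripped = token.strip("\"'“”‘’()[]{}<>«»,-—–:;,.!?")
--     if not stripped:
--         return False
--
--     alpha_chars = [char for char in stripped if char.isalpha()]
--     if not alpha_chars:
--         return False
--
--     if all(char.isupper() for char in alpha_chars):
--         return True
--
--     for char in stripped:
--         if char.isalpha():
--             return char.isupper()
--     return False
-- ===== SOURCE B (Python) =====
-- def is_heading_like_alpha_token(token: str) -> bool: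
--     stripped = token.strip("\"'“”‘’()[]{}<>«»,-—–:;,.!?")
--     return next((c.isupper() for c in stripped if c.isalpha()), False)
-- ===== Notes on version B (the rewrite author's own statement) =====
-- stated objective: simpler
-- what changed: Replaces A's three passes over the stripped token (alpha-char filter, all(isupper) aggregate, then a first-alpha loop) with a single short-circuiting pass returning the first alphabetic character's isupper(), which coincides with A's answer in every branch.
import Mathlib
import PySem

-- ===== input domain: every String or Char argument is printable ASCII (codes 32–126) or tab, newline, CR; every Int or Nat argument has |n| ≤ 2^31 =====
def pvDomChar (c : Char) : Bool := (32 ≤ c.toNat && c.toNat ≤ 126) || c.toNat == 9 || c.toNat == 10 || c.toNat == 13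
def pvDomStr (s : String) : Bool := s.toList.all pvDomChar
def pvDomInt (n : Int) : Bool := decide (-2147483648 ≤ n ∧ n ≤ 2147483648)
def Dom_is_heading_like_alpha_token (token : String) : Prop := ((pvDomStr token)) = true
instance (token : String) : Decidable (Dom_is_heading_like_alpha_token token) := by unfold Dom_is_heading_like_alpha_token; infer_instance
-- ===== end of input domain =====

-- B replaces A's three passes over the stripped token (alpha filter, all-upper check, first-alpha loop)
-- with one pass returning the first alphabetic character's upper-case status; objective: simpler.


-- ===== PORT A =====
-- the final 'for char in stripped: if char.isalpha(): return char.isupper()' loop of A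
def pvALoop : List Char → Bool
  | [] => false
  | c :: cs => if PySem.Chars.isalpha c then PySem.Chars.isupper c else pvALoop cs

def is_heading_like_alpha_token (token : String) : Bool :=
  let stripped := PySem.Str.stripChars token "\"'“”‘’()[]{}<>«»,-—–:;,.!?"
  if PySem.Str.len stripped = 0 then false
  else
    let alpha_chars := stripped.toList.filter (fun c => PySem.Chars.isalpha c)
    if alpha_chars.isEmpty then false
    else if alpha_chars.all (fun c => PySem.Chars.isupper c) then true
    else pvALoop stripped.toList

-- ===== PORT B =====
-- next((c.isupper() for c in stripped if c.isalpha()), False): the first alphabetic character decides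
def is_heading_like_alpha_token_alt (token : String) : Bool :=
  let stripped := PySem.Str.stripChars token "\"'“”‘’()[]{}<>«»,-—–:;,.!?"
  match stripped.toList.find? (fun c => PySem.Chars.isalpha c) with
  | some c => PySem.Chars.isupper c
  | none => false

-- ===== PRECONDITION & SPEC =====
def Spec_is_heading_like_alpha_token (token : String) (out : Bool) : Prop := out = is_heading_like_alpha_token_alt token
instance (token : String) (out : Bool) : Decidable (Spec_is_heading_like_alpha_token token out) := by unfold Spec_is_heading_like_alpha_token; infer_instance

-- ===== CLAIM (what is proved, stated in full; the proofs are below) =====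
def Claim_equal_is_heading_like_alpha_token : Prop := ∀ (token : String), Dom_is_heading_like_alpha_token token → Spec_is_heading_like_alpha_token token (is_heading_like_alpha_token token)

-- ===== LEMMAS AND PROOFS =====
-- the value B computes from a char list
def pvFindVal (l : List Char) : Bool :=
  match l.find? (fun c => PySem.Chars.isalpha c) with
  | some c => PySem.Chars.isupper c
  | none => false

theorem pvALoop_eq_first (l : List Char) : pvALoop l = pvFindVal l := by
  induction l with
  | nil => rfl
  | cons c cs ih =>
    by_cases hc : PySem.Chars.isalpha c = true
    · simp [pvALoop, pvFindVal, List.find?_cons_of_pos, hc]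
    · simp only [pvALoop, hc, Bool.false_eq_true, if_false, ih, pvFindVal]
      rw [List.find?_cons_of_neg (by simp [hc])]

theorem first_of_no_alpha (l : List Char)
    (h : l.filter (fun c => PySem.Chars.isalpha c) = []) : pvFindVal l = false := by
  induction l with
  | nil => rfl
  | cons c cs ih =>
    simp only [List.filter_cons] at h
    by_cases hc : PySem.Chars.isalpha c = true
    · simp [hc] at h
    · simp only [pvFindVal]
      simp only [hc, Bool.false_eq_true, if_false] at h
      simpa [hc] using ih h

theorem first_of_all_upper (l : List Char)
    (hne : l.filter (fun c => PySem.Chars.isalpha c) ≠ [])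
    (hall : (l.filter (fun c => PySem.Chars.isalpha c)).all (fun c => PySem.Chars.isupper c) = true) :
    pvFindVal l = true := by
  induction l with
  | nil => simp at hne
  | cons c cs ih =>
    simp only [List.filter_cons] at hne hall
    by_cases hc : PySem.Chars.isalpha c = true
    · simp only [hc, if_true, List.all_cons, Bool.and_eq_true] at hall
      simp [pvFindVal, hc, hall.1]
    · simp only [hc, Bool.false_eq_true, if_false] at hne hall
      simpa [pvFindVal, hc] using ih hne hall

theorem pvMainList (l : List Char) :
    (if (l.length : Int) = 0 then false
     else if (l.filter (fun c => PySem.Chars.isalpha c)).isEmpty then false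
     else if (l.filter (fun c => PySem.Chars.isalpha c)).all (fun c => PySem.Chars.isupper c) then true
     else pvALoop l) = pvFindVal l := by
  by_cases hlen : (l.length : Int) = 0
  · have hl : l = [] := by
      rw [List.length_eq_zero_iff.symm]
      exact_mod_cast hlen
    rw [if_pos hlen, hl]; rfl
  · rw [if_neg hlen]
    by_cases hemp : (l.filter (fun c => PySem.Chars.isalpha c)).isEmpty = true
    · rw [List.isEmpty_iff] at hemp
      simp [hemp, first_of_no_alpha _ hemp]
    · simp only [List.isEmpty_iff] at hemp
      by_cases hall : (l.filter (fun c => PySem.Chars.isalpha c)).all (fun c => PySem.Chars.isupper c) = true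
      · simp [List.isEmpty_iff, hemp, hall, first_of_all_upper _ hemp hall]
      · simp [List.isEmpty_iff, hemp, hall, pvALoop_eq_first]

-- ===== VERDICT (by name: the statement is the Claim_ definition above) =====
theorem is_heading_like_alpha_token_spec : Claim_equal_is_heading_like_alpha_token := by
  intro token _
  unfold Spec_is_heading_like_alpha_token is_heading_like_alpha_token is_heading_like_alpha_token_alt
  simp only [PySem.Str.len_eq]
  exact pvMainList _
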